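-- pv_equiv track=rewrite | github.com/bssrdf/pyleet | CountNumberofTexts.py | countTexts
-- ===== SOURCE A (Python) =====
-- def countTexts(pressedKeys: str) -> int:
--     mod = 10**9 + 7
--     def count(c, n):
--         dp = [0]*(n+1)
--         dp[0] = 1
--         for i in range(1,n+1):
--             dp[i] += dp[i-1]
--             if i > 1: dp[i] += dp[i-2]
--             if i > 2: dp[i] += dp[i-3]
--             if (c == '7' or c == '9') and i > 3:
--                 dp[i] += dp[i-4]
--         return dp[n]
--
--     def dfs(s):
--         if not s: return 1
--         i = 1
--         while i < len(s) and s[i] == s[i-1]: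
--             i += 1
--         ans = count(s[i-1], i) * dfs(s[i:]) % mod
--         return ans
--
--     return dfs(pressedKeys)
-- ===== SOURCE B (Python) =====
-- def countTexts(pressedKeys: str) -> int:
--     # Single linear pass: rolling 4-term DP within each run, product across runs (no slicing, no recursion).
--     mod = 10 ** 9 + 7
--     ans = 1
--     prev = None
--     a, b, c, d = 1, 0, 0, 0
--     for ch in pressedKeys:
--         if ch != prev:
--             ans = ans * a % mod
--             a, b, c, d = 1, 0, 0, 0
--             prev = ch
--         a, b, c, d = a + b + c + (d if ch in ('7', '9') else 0), a, b, c
--     return ans * a % mod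
-- ===== Notes on version B (the rewrite author's own statement) =====
-- stated objective: faster
-- what changed: Replaced the recursive dfs with O(n^2) string slicing plus a per-run dp array by one linear pass that keeps a rolling 4-value DP inside the current run and multiplies the per-run count into the answer at each run boundary.
import Mathlib
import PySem

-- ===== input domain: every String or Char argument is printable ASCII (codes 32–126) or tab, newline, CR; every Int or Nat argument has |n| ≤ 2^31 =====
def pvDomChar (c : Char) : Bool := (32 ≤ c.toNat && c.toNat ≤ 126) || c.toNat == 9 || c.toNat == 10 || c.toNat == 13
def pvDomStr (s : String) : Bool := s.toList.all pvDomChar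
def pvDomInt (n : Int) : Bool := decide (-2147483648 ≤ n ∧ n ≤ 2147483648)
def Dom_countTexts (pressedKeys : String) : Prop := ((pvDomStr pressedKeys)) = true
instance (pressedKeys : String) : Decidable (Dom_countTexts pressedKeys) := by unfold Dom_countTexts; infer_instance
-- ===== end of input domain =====

-- B replaces A's recursive dfs (string slicing + per-run dp array) by one linear pass with a
-- rolling 4-value DP per run, multiplying per-run counts at run boundaries.

-- ===== PORT A =====
-- dp[i] read/write helpers; at every use in `count` the index is nonnegative and in range,
-- so the `.getD 0` default and `.toNat` are exact there.
def pvLGet (dp : List Int) (i : Int) : Int := (PySem.List.pyGet? dp i).getD 0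
def pvLSet (dp : List Int) (i : Int) (v : Int) : List Int := dp.set i.toNat v

-- body of `for i in range(1, n+1)` in `count`
def pvCountStep (c : Char) (dp : List Int) (i : Int) : List Int :=
  let dp1 := pvLSet dp i (pvLGet dp i + pvLGet dp (i-1))
  let dp2 := if 1 < i then pvLSet dp1 i (pvLGet dp1 i + pvLGet dp1 (i-2)) else dp1
  let dp3 := if 2 < i then pvLSet dp2 i (pvLGet dp2 i + pvLGet dp2 (i-3)) else dp2
  if (c = '7' ∨ c = '9') ∧ 3 < i then pvLSet dp3 i (pvLGet dp3 i + pvLGet dp3 (i-4)) else dp3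

-- `count(c, n)` of A
def pvCount (c : Char) (n : Nat) : Int :=
  let dp0 := pvLSet (List.replicate (n+1) (0:Int)) 0 1
  pvLGet ((PySem.List.pyRange 1 ((n:Int)+1) 1).foldl (pvCountStep c) dp0) (n:Int)

-- `while i < len(s) and s[i] == s[i-1]: i += 1` of dfs
def pvRunLen (s : List Char) (i : Nat) : Nat :=
  if h : i < s.length ∧ PySem.List.pyGet? s (i:Int) = PySem.List.pyGet? s ((i:Int)-1) then
    pvRunLen s (i+1)
  else i
termination_by s.length - i
decreasing_by omega

-- needed by pvDfs's termination proof
lemma pvRunLen_ge (s : List Char) (i : Nat) : i ≤ pvRunLen s i := by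
  rw [pvRunLen]
  split
  · exact (Nat.le_succ i).trans (pvRunLen_ge s (i+1))
  · exact le_refl i
termination_by s.length - i
decreasing_by omega

-- `dfs(s)` of A; s[i-1] is always in range (1 ≤ i ≤ len s), so the `.getD 'a'` default never fires
def pvDfs (s : List Char) : Int :=
  if hs : s = [] then 1
  else
    let i := pvRunLen s 1
    pvCount ((PySem.List.pyGet? s ((i:Int)-1)).getD 'a') i *
      pvDfs (PySem.List.slice s (some (i:Int)) none) % 1000000007
termination_by s.length
decreasing_by
  have h1 := pvRunLen_ge s 1
  have h2 : s.length ≠ 0 := fun h => hs (List.eq_nil_of_length_eq_zero h)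
  simp only [PySem.List.slice_from_natCast, List.length_drop]
  omega

def countTexts (pressedKeys : String) : Int := pvDfs pressedKeys.toList

-- ===== PORT B =====
-- loop body of B: one step of the rolling DP, with run-boundary reset
def pvStep (st : Int × Option Char × Int × Int × Int × Int) (ch : Char) :
    Int × Option Char × Int × Int × Int × Int :=
  let (ans, prev, a, b, c, d) := st
  let (ans, prev, a, b, c, d) :=
    if some ch ≠ prev then (ans * a % 1000000007, some ch, (1:Int), (0:Int), (0:Int), (0:Int))
    else (ans, prev, a, b, c, d)
  (ans, prev, a + b + c + (if ch = '7' ∨ ch = '9' then d else 0), a, b, c)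

def countTexts_alt (pressedKeys : String) : Int :=
  let st := pressedKeys.toList.foldl pvStep (1, none, 1, 0, 0, 0)
  st.1 * st.2.2.1 % 1000000007

-- ===== PRECONDITION & SPEC =====
def Spec_countTexts (pressedKeys : String) (out : Int) : Prop := out = countTexts_alt pressedKeys
instance (pressedKeys : String) (out : Int) : Decidable (Spec_countTexts pressedKeys out) := by unfold Spec_countTexts; infer_instance

-- ===== CLAIM (what is proved, stated in full; the proofs are below) =====
def Claim_equal_countTexts : Prop := ∀ (pressedKeys : String), Dom_countTexts pressedKeys → Spec_countTexts pressedKeys (countTexts pressedKeys)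

-- ===== LEMMAS AND PROOFS =====

-- reference count: number of decodings of a run of length n of key c
def pvTr (c : Char) : Nat → Int
  | 0 => 1
  | 1 => 1
  | 2 => 2
  | 3 => 4
  | n+4 => pvTr c (n+3) + pvTr c (n+2) + pvTr c (n+1) + (if c = '7' ∨ c = '9' then pvTr c n else 0)

lemma pvTr_succ (c : Char) (j : Nat) :
    pvTr c (j+1) = pvTr c j + (if 1 ≤ j then pvTr c (j-1) else 0)
      + (if 2 ≤ j then pvTr c (j-2) else 0)
      + (if (c = '7' ∨ c = '9') ∧ 3 ≤ j then pvTr c (j-3) else 0) := by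
  match j with
  | 0 => simp [pvTr]
  | 1 => simp [pvTr]
  | 2 => simp [pvTr]
  | j+3 => simp [pvTr]

lemma pvLGet_natCast (dp : List Int) (j : Nat) : pvLGet dp (j:Int) = dp.getD j 0 := by
  simp [pvLGet, PySem.List.pyGet?_natCast, List.getD]

lemma pvLSet_natCast (dp : List Int) (j : Nat) (v : Int) : pvLSet dp (j:Int) v = dp.set j v := by
  simp [pvLSet]

lemma getD_set_self (dp : List Int) (j : Nat) (v : Int) (h : j < dp.length) :
    (dp.set j v).getD j 0 = v := by
  simp [List.getD, h]

lemma getD_set_ne (dp : List Int) (j j' : Nat) (v : Int) (h : j ≠ j') :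
    (dp.set j v).getD j' 0 = dp.getD j' 0 := by
  simp [List.getD, h]

lemma countA_step (c : Char) (dp : List Int) (k : Nat) (hlen : k+1 < dp.length)
    (hget : ∀ j, dp.getD j 0 = if j ≤ k then pvTr c j else 0) :
    pvCountStep c dp (1 + (k:Int)) = dp.set (k+1) (pvTr c (k+1)) := by
  have g_hi : ∀ v : Int, pvLGet (dp.set (k+1) v) (((k+1:Nat)):Int) = v := fun v => by
    rw [pvLGet_natCast]; exact getD_set_self dp (k+1) v hlen
  have g_lo : ∀ (v : Int) (m : Nat), m ≤ k → pvLGet (dp.set (k+1) v) ((m:Nat):Int) = pvTr c m := by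
    intro v m hm
    rw [pvLGet_natCast, getD_set_ne dp (k+1) m v (by omega), hget]
    simp [hm]
  have g_hi0 : pvLGet dp ((k+1:Nat):Int) = 0 := by
    rw [pvLGet_natCast, hget]; simp
  have g_lo0 : pvLGet dp ((k:Nat):Int) = pvTr c k := by
    rw [pvLGet_natCast, hget]; simp
  have e1 : (1 + (k:Int)) = ((k+1:Nat):Int) := by omega
  have e2 : ((k+1:Nat):Int) - 1 = ((k:Nat):Int) := by omega
  have gl1 : ∀ v : Int, pvLGet (dp.set (k+1) v) ((k-1:Nat):Int) = pvTr c (k-1) :=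
    fun v => g_lo v (k-1) (by omega)
  have gl2 : ∀ v : Int, pvLGet (dp.set (k+1) v) ((k-2:Nat):Int) = pvTr c (k-2) :=
    fun v => g_lo v (k-2) (by omega)
  have gl3 : ∀ v : Int, pvLGet (dp.set (k+1) v) ((k-3:Nat):Int) = pvTr c (k-3) :=
    fun v => g_lo v (k-3) (by omega)
  simp only [pvCountStep, e1, e2]
  rw [g_hi0, g_lo0]
  by_cases h1 : 1 ≤ k
  case neg =>
    have hk0 : k = 0 := by omega
    subst hk0
    rw [if_neg (show ¬ (1:Int) < ((0+1:Nat):Int) by omega),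
        if_neg (show ¬ (2:Int) < ((0+1:Nat):Int) by omega),
        if_neg (show ¬ ((c = '7' ∨ c = '9') ∧ (3:Int) < ((0+1:Nat):Int)) from
          fun h => absurd h.2 (by omega))]
    simp [pvLSet, pvTr]
  case pos =>
    have e3 : ((k+1:Nat):Int) - 2 = ((k-1:Nat):Int) := by omega
    rw [if_pos (show (1:Int) < ((k+1:Nat):Int) by omega)]
    by_cases h2 : 2 ≤ k
    case neg =>
      have hk1 : k = 1 := by omega
      subst hk1
      rw [if_neg (show ¬ (2:Int) < ((1+1:Nat):Int) by omega),
          if_neg (show ¬ ((c = '7' ∨ c = '9') ∧ (3:Int) < ((1+1:Nat):Int)) from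
            fun h => absurd h.2 (by omega))]
      simp only [pvLSet_natCast, List.set_set, e3, g_hi, gl1]
      simp [pvTr]
    case pos =>
      have e4 : ((k+1:Nat):Int) - 3 = ((k-2:Nat):Int) := by omega
      rw [if_pos (show (2:Int) < ((k+1:Nat):Int) by omega)]
      by_cases h3 : 3 ≤ k
      case neg =>
        have hk2 : k = 2 := by omega
        subst hk2
        rw [if_neg (show ¬ ((c = '7' ∨ c = '9') ∧ (3:Int) < ((2+1:Nat):Int)) from
            fun h => absurd h.2 (by omega))]
        simp only [pvLSet_natCast, List.set_set, e3, e4, g_hi, gl1, gl2]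
        simp [pvTr]
      case pos =>
        have e5 : ((k+1:Nat):Int) - 4 = ((k-3:Nat):Int) := by omega
        by_cases hq : c = '7' ∨ c = '9'
        · rw [if_pos (show (c = '7' ∨ c = '9') ∧ (3:Int) < ((k+1:Nat):Int) from
              ⟨hq, by omega⟩)]
          simp only [pvLSet_natCast, List.set_set, e3, e4, e5, g_hi, gl1, gl2, gl3]
          congr 1
          rw [pvTr_succ c k]
          simp [h1, h2, h3, hq]
        · rw [if_neg (show ¬ ((c = '7' ∨ c = '9') ∧ (3:Int) < ((k+1:Nat):Int)) from
              fun h => hq h.1)]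
          simp only [pvLSet_natCast, List.set_set, e3, e4, g_hi, gl1, gl2]
          congr 1
          rw [pvTr_succ c k]
          simp [h1, h2, h3, hq]

lemma countA_inv (c : Char) (n : Nat) : ∀ k, k ≤ n →
    ((List.range k).foldl (fun dp (j : Nat) => pvCountStep c dp (1 + (j:Int)))
        (pvLSet (List.replicate (n+1) (0:Int)) 0 1)).length = n+1 ∧
    ∀ j, ((List.range k).foldl (fun dp (j : Nat) => pvCountStep c dp (1 + (j:Int)))
        (pvLSet (List.replicate (n+1) (0:Int)) 0 1)).getD j 0
      = if j ≤ k then pvTr c j else 0 := by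
  intro k
  induction k with
  | zero =>
    intro _
    rw [List.range_zero, List.foldl_nil]
    constructor
    · simp [pvLSet]
    · intro j
      match j with
      | 0 =>
        rw [show pvLSet (List.replicate (n+1) (0:Int)) 0 1
            = (List.replicate (n+1) (0:Int)).set 0 1 from rfl]
        rw [getD_set_self _ 0 1 (by simp)]
        simp [pvTr]
      | j+1 =>
        rw [show pvLSet (List.replicate (n+1) (0:Int)) 0 1
            = (List.replicate (n+1) (0:Int)).set 0 1 from rfl]
        rw [getD_set_ne _ 0 (j+1) 1 (by omega)]
        simp [List.getD, List.getElem?_replicate]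
        split <;> rfl
  | succ k ih =>
    intro hk
    obtain ⟨ihlen, ihget⟩ := ih (by omega)
    rw [List.range_succ, List.foldl_append, List.foldl_cons, List.foldl_nil]
    rw [countA_step c _ k (by rw [ihlen]; omega) ihget]
    refine ⟨by simp [ihlen], ?_⟩
    intro j
    by_cases hj : j = k+1
    · subst hj
      rw [getD_set_self _ _ _ (by rw [ihlen]; omega)]
      simp
    · rw [getD_set_ne _ _ _ _ (fun h => hj h.symm), ihget j]
      by_cases hjk : j ≤ k
      · simp [hjk, show j ≤ k+1 by omega]
      · simp [hjk, show ¬ j ≤ k+1 by omega]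

lemma pvCount_eq (c : Char) (n : Nat) : pvCount c n = pvTr c n := by
  simp only [pvCount]
  rw [PySem.List.pyRange_one]
  rw [show ((n:Int) + 1 - 1).toNat = n by omega]
  rw [List.foldl_map]
  obtain ⟨hlen, hget⟩ := countA_inv c n n le_rfl
  rw [pvLGet_natCast, hget n]
  simp

-- indexing facts about a run followed by rest
lemma run_get_lt (c : Char) (m : Nat) (rest : List Char) (j : Nat) (hj : j < m) :
    PySem.List.pyGet? (List.replicate m c ++ rest) (j:Int) = some c := by
  rw [PySem.List.pyGet?_natCast, List.getElem?_append_left (by simpa using hj)]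
  simp [hj]

lemma run_get_m (c : Char) (m : Nat) (rest : List Char) :
    PySem.List.pyGet? (List.replicate m c ++ rest) (m:Int) = rest.head? := by
  rw [PySem.List.pyGet?_natCast]
  rw [show m = (List.replicate m c).length + 0 by simp]
  rw [List.getElem?_append_right (by simp)]
  simp [← List.head?_eq_getElem?]

lemma cast_pred (i : Nat) (h : 1 ≤ i) : (i:Int) - 1 = ((i-1 : Nat) : Int) := by omega

-- run length: A's while loop on a run of length m
lemma pvRunLen_run (c : Char) (m : Nat) (rest : List Char) (hr : rest.head? ≠ some c)
    (i : Nat) (h1 : 1 ≤ i) (h2 : i ≤ m) : pvRunLen (List.replicate m c ++ rest) i = m := by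
  rw [pvRunLen]
  by_cases him : i < m
  · rw [dif_pos ?_]
    · exact pvRunLen_run c m rest hr (i+1) (by omega) (by omega)
    · constructor
      · simpa using Nat.lt_of_lt_of_le him (Nat.le_add_right m rest.length)
      · rw [run_get_lt c m rest i him, cast_pred i h1, run_get_lt c m rest (i-1) (by omega)]
  · have him' : i = m := by omega
    subst him'
    rw [dif_neg ?_]
    intro ⟨hl, hg⟩
    rw [run_get_m, cast_pred i h1, run_get_lt c i rest (i-1) (by omega)] at hg
    exact hr hg
termination_by m - i

lemma pvDfs_run (c : Char) (k : Nat) (rest : List Char) (hr : rest.head? ≠ some c) :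
    pvDfs (List.replicate (k+1) c ++ rest) = pvTr c (k+1) * pvDfs rest % 1000000007 := by
  rw [pvDfs, dif_neg (by simp : ¬(List.replicate (k+1) c ++ rest = []))]
  have hlen := pvRunLen_run c (k+1) rest hr 1 le_rfl (by omega)
  simp only [hlen]
  rw [cast_pred (k+1) (by omega)]
  rw [run_get_lt c (k+1) rest (k+1-1) (by omega)]
  rw [PySem.List.slice_from_natCast]
  rw [show (List.replicate (k+1) c ++ rest).drop (k+1)
      = (List.replicate (k+1) c ++ rest).drop (List.replicate (k+1) c).length by simp]
  rw [List.drop_left]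
  rw [pvCount_eq]
  rfl

-- rolling-DP components of B mid-run
def pvW (c : Char) (j m : Nat) : Int := if m ≤ j then pvTr c (j - m) else 0

lemma pvW_succ (c : Char) (j m : Nat) : pvW c (j+1) (m+1) = pvW c j m := by
  simp [pvW, Nat.succ_sub_succ]

lemma pvStep_run (c : Char) (j : Nat) (ans : Int) :
    pvStep (ans, some c, pvTr c j, pvW c j 1, pvW c j 2, pvW c j 3) c
      = (ans, some c, pvTr c (j+1), pvW c (j+1) 1, pvW c (j+1) 2, pvW c (j+1) 3) := by
  simp only [pvStep]
  rw [if_neg (by simp)]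
  dsimp only
  refine congrArg (Prod.mk ans) (congrArg (Prod.mk (some c)) ?_)
  have h3 : (if c = '7' ∨ c = '9' then pvW c j 3 else 0)
      = (if (c = '7' ∨ c = '9') ∧ 3 ≤ j then pvTr c (j-3) else 0) := by
    unfold pvW; split_ifs with h1 h2 <;> simp_all
  have key : pvTr c j + pvW c j 1 + pvW c j 2
      + (if (c = '7' ∨ c = '9') ∧ 3 ≤ j then pvTr c (j-3) else 0) = pvTr c (j+1) := by
    rw [pvTr_succ]; simp only [pvW]
  rw [h3, key]
  have b1 : pvW c (j+1) 1 = pvTr c j := by simp [pvW]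
  have b2 : pvW c (j+1) 2 = pvW c j 1 := pvW_succ c j 1
  have b3 : pvW c (j+1) 3 = pvW c j 2 := pvW_succ c j 2
  rw [b1, b2, b3]

lemma runB (c : Char) (k : Nat) : ∀ j (ans : Int), 1 ≤ j →
    (List.replicate k c).foldl pvStep (ans, some c, pvTr c j, pvW c j 1, pvW c j 2, pvW c j 3)
      = (ans, some c, pvTr c (j+k), pvW c (j+k) 1, pvW c (j+k) 2, pvW c (j+k) 3) := by
  induction k with
  | zero => intro j ans hj; simp
  | succ k ih =>
    intro j ans hj
    rw [List.replicate_succ, List.foldl_cons, pvStep_run, ih (j+1) ans (by omega)]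
    have e : j+1+k = j+(k+1) := by omega
    rw [e]

lemma runSplit : ∀ (t : List Char) (c : Char), ∃ k rest,
    c :: t = List.replicate (k+1) c ++ rest ∧ rest.head? ≠ some c := by
  intro t
  induction t with
  | nil => exact fun c => ⟨0, [], by simp, by simp⟩
  | cons x t ih =>
    intro c
    by_cases hx : x = c
    · subst hx
      obtain ⟨k, rest, h1, h2⟩ := ih x
      exact ⟨k+1, rest, by rw [List.replicate_succ, List.cons_append, ← h1], h2⟩
    · exact ⟨0, x :: t, by simp, by simp [hx]⟩

lemma mod_juggle (x y z : Int) :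
    x % 1000000007 * y * z % 1000000007 = x * (y * z % 1000000007) % 1000000007 := by
  conv_lhs => rw [mul_assoc, Int.mul_emod, Int.emod_emod_of_dvd x dvd_rfl]
  conv_rhs => rw [Int.mul_emod, Int.emod_emod_of_dvd (y * z) dvd_rfl]

lemma mainB : ∀ (n : Nat) (s : List Char), s.length ≤ n → ∀ (ans : Int) (prev : Option Char) (a b cc d : Int),
    (s ≠ [] → prev ≠ s.head?) →
    (s.foldl pvStep (ans, prev, a, b, cc, d)).1 * (s.foldl pvStep (ans, prev, a, b, cc, d)).2.2.1 % 1000000007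
      = ans * a * pvDfs s % 1000000007 := by
  intro n
  induction n with
  | zero =>
    intro s hs ans prev a b cc d _
    have : s = [] := List.eq_nil_of_length_eq_zero (by omega)
    subst this
    rw [pvDfs]
    simp
  | succ n ih =>
    intro s hs ans prev a b cc d hprev
    match s with
    | [] => rw [pvDfs]; simp
    | c :: t =>
      obtain ⟨k, rest, hsplit, hr⟩ := runSplit t c
      have hprev' : prev ≠ some c := by simpa using hprev (by simp)
      rw [show c :: t = List.replicate (k+1) c ++ rest from hsplit]
      rw [List.replicate_succ, List.cons_append, List.foldl_cons]
      have hstep0 : pvStep (ans, prev, a, b, cc, d) c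
          = (ans * a % 1000000007, some c, pvTr c 1, pvW c 1 1, pvW c 1 2, pvW c 1 3) := by
        simp only [pvStep]
        rw [if_pos (fun h => hprev' h.symm)]
        simp [pvW, pvTr]
      rw [hstep0, List.foldl_append, runB c k 1 _ le_rfl]
      have hlen : (c :: t).length = k + 1 + rest.length := by
        rw [hsplit]; simp
      have hrest : rest.length ≤ n := by simp at hlen hs; omega
      have hcond : rest ≠ [] → (some c : Option Char) ≠ rest.head? := fun _ h => hr h.symm
      rw [ih rest hrest (ans * a % 1000000007) (some c) (pvTr c (1+k))
          (pvW c (1+k) 1) (pvW c (1+k) 2) (pvW c (1+k) 3) hcond]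
      rw [show List.replicate k c ++ rest = List.replicate (k+1-1) c ++ rest by simp]
      rw [show c :: (List.replicate (k+1-1) c ++ rest) = List.replicate (k+1) c ++ rest by
        rw [show k+1-1 = k by omega, ← List.cons_append, ← List.replicate_succ]]
      rw [pvDfs_run c k rest hr]
      rw [show 1+k = k+1 by omega]
      rw [show ans * a % 1000000007 * pvTr c (k+1) * pvDfs rest % 1000000007
          = ans * a * (pvTr c (k+1) * pvDfs rest % 1000000007) % 1000000007
        from mod_juggle (ans*a) (pvTr c (k+1)) (pvDfs rest)]

lemma pvDfs_emod (s : List Char) : pvDfs s % 1000000007 = pvDfs s := by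
  match s with
  | [] => rw [pvDfs]; norm_num
  | c :: t =>
    rw [pvDfs, dif_neg (by simp : ¬(c :: t = []))]
    exact Int.emod_emod_of_dvd _ dvd_rfl

-- ===== VERDICT (by name: the statement is the Claim_ definition above) =====
theorem countTexts_spec : Claim_equal_countTexts := by
  intro s _
  unfold Spec_countTexts countTexts countTexts_alt
  have h := mainB s.toList.length s.toList le_rfl 1 none 1 0 0 0 (by
    intro hne
    cases hl : s.toList.head? with
    | none => exact absurd (List.head?_eq_none_iff.mp hl) hne
    | some c => simp)
  simp only [one_mul] at h
  simp only [h, pvDfs_emod]
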